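-- pv_equiv track=rewrite | github.com/AlShomar/NFR-Modeling-with-LLMs | NoRAGNOGram.py | parse_sig
-- ===== SOURCE A (Python) =====
-- allowed_relations = {"AND", "OR", "HELP", "HURT"}
--
-- def parse_sig(sig: str) -> bool:
--     lines = sig.split(" | ")
--     for line in lines:
--         parts = line.split(":")
--         if len(parts) != 2:
--             return False
--
--         main_category = parts[0].strip()
--         rest = parts[1].strip()
--
--         if not main_category.isalpha():
--             return False
--
--         tokens = rest.split()
--         if len(tokens) < 3:
--             return False
--
--         expecting_relation = False
--         for token in tokens:
--             if expecting_relation: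
--                 if token not in allowed_relations:
--                     return False
--                 expecting_relation = False
--             else:
--                 if not token.isalpha():
--                     return False
--                 expecting_relation = True
--
--         if tokens[-1] in allowed_relations:
--             return False
--
--     return True
-- ===== SOURCE B (Python) =====
-- allowed_relations = {"AND", "OR", "HELP", "HURT"}
--
-- def _line_ok(line):
--     parts = line.split(":")
--     if len(parts) != 2:
--         return False
--     if not parts[0].strip().isalpha():
--         return False
--     tokens = parts[1].strip().split()
--     if len(tokens) < 3:
--         return False
--     return (all(t.isalpha() for t in tokens[0::2])
--             and all(t in allowed_relations for t in tokens[1::2])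
--             and tokens[-1] not in allowed_relations)
--
-- def parse_sig(sig: str) -> bool:
--     return all(_line_ok(line) for line in sig.split(" | "))
-- ===== Notes on version B (the rewrite author's own statement) =====
-- stated objective: simpler
-- what changed: The stateful flag-toggling token loop is replaced by two positional passes (even-index tokens must be alphabetic, odd-index tokens must be relation keywords), and the early-return line loop becomes an all() over a per-line predicate.
import Mathlib
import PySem

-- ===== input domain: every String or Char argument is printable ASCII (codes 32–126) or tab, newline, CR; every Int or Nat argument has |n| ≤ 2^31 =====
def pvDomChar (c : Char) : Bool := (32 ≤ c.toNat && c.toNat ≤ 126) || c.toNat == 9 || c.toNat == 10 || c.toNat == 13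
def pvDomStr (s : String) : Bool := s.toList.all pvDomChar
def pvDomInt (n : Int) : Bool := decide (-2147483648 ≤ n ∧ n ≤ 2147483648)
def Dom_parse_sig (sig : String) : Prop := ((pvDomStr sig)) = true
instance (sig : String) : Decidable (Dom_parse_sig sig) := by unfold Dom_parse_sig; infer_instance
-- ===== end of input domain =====

-- B replaces A's stateful flag-toggling token loop by two positional passes (even-index
-- tokens alphabetic, odd-index tokens relation keywords) and folds the line loop into all(); objective: simpler.

-- ===== PORT A =====
def allowedRelations : PySem.Set String := PySem.Set.ofList ["AND", "OR", "HELP", "HURT"]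

-- the inner 'for token in tokens' loop with its expecting_relation flag
def parseSigTokenLoop : List String → Bool → Bool
  | [], _ => true
  | t :: rest, expecting =>
    if expecting then
      if !(allowedRelations.contains t) then false
      else parseSigTokenLoop rest false
    else
      if !(PySem.Str.strIsalpha t) then false
      else parseSigTokenLoop rest true

-- the outer 'for line in lines' loop with its early returns
def parseSigLineLoop : List String → Bool
  | [] => true
  | line :: rest =>
    let parts := (PySem.Str.split? line ":").getD []   -- sep ":" ≠ "", so split? is always some
    if parts.length ≠ 2 then false
    else
      let main_category := PySem.Str.strip (parts.getD 0 "")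
      let restStr := PySem.Str.strip (parts.getD 1 "")
      if !(PySem.Str.strIsalpha main_category) then false
      else
        let tokens := PySem.Str.split₀ restStr
        if tokens.length < 3 then false
        else if !(parseSigTokenLoop tokens false) then false
        else if allowedRelations.contains (PySem.List.pyGetD tokens (-1) "") then false
        else parseSigLineLoop rest

def parse_sig (sig : String) : Bool :=
  parseSigLineLoop ((PySem.Str.split? sig " | ").getD [])

-- ===== PORT B =====
-- hand port of the step slice xs[0::2] (PySem has no step slices); exact for step 2 from 0
def everyOther : List String → List String
  | [] => []
  | [x] => [x]
  | x :: _ :: rest => x :: everyOther rest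

def lineOk (line : String) : Bool :=
  let parts := (PySem.Str.split? line ":").getD []   -- sep ":" ≠ "", so split? is always some
  if parts.length ≠ 2 then false
  else if !(PySem.Str.strIsalpha (PySem.Str.strip (parts.getD 0 ""))) then false
  else
    let tokens := PySem.Str.split₀ (PySem.Str.strip (parts.getD 1 ""))
    if tokens.length < 3 then false
    else
      (everyOther tokens).all PySem.Str.strIsalpha
      && (everyOther tokens.tail).all (fun t => allowedRelations.contains t)
      && !(allowedRelations.contains (PySem.List.pyGetD tokens (-1) ""))

def parse_sig_alt (sig : String) : Bool :=
  ((PySem.Str.split? sig " | ").getD []).all lineOk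

-- ===== PRECONDITION & SPEC =====
def Spec_parse_sig (sig : String) (out : Bool) : Prop := out = parse_sig_alt sig
instance (sig : String) (out : Bool) : Decidable (Spec_parse_sig sig out) := by unfold Spec_parse_sig; infer_instance

-- ===== CLAIM (what is proved, stated in full; the proofs are below) =====
def Claim_equal_parse_sig : Prop := ∀ (sig : String), Dom_parse_sig sig → Spec_parse_sig sig (parse_sig sig)

-- ===== LEMMAS AND PROOFS =====

lemma everyOther_cons (x : String) (xs : List String) :
    everyOther (x :: xs) = x :: everyOther xs.tail := by
  cases xs <;> rfl

-- the flag loop equals the two positional passes (proved simultaneously for both flag values)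
lemma tokenLoop_eq (ts : List String) :
    (parseSigTokenLoop ts false =
      ((everyOther ts).all PySem.Str.strIsalpha
        && (everyOther ts.tail).all (fun t => allowedRelations.contains t)))
    ∧ (parseSigTokenLoop ts true =
      ((everyOther ts).all (fun t => allowedRelations.contains t)
        && (everyOther ts.tail).all PySem.Str.strIsalpha)) := by
  induction ts with
  | nil => constructor <;> rfl
  | cons t rest ih =>
    obtain ⟨h1, h2⟩ := ih
    constructor
    · show (if !(PySem.Str.strIsalpha t) then false else parseSigTokenLoop rest true) = _
      rw [everyOther_cons, List.tail_cons, h2, List.all_cons]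
      cases h : PySem.Str.strIsalpha t
      · rfl
      · simp only [Bool.not_true, Bool.false_eq_true, if_false, Bool.true_and]
        rw [Bool.and_comm]
    · show (if !(allowedRelations.contains t) then false else parseSigTokenLoop rest false) = _
      rw [everyOther_cons, List.tail_cons, h1, List.all_cons]
      cases h : allowedRelations.contains t
      · rfl
      · simp only [Bool.not_true, Bool.false_eq_true, if_false, Bool.true_and]
        rw [Bool.and_comm]

lemma tokenLoop_false (ts : List String) :
    parseSigTokenLoop ts false =
      ((everyOther ts).all PySem.Str.strIsalpha
        && (everyOther ts.tail).all (fun t => allowedRelations.contains t)) :=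
  (tokenLoop_eq ts).1

lemma lineLoop_eq_all (lines : List String) : parseSigLineLoop lines = lines.all lineOk := by
  induction lines with
  | nil => rfl
  | cons line rest ih =>
    rw [List.all_cons, ← ih]
    simp only [parseSigLineLoop, lineOk, tokenLoop_false]
    generalize (PySem.Str.split? line ":").getD [] = ps
    generalize PySem.Str.split₀ (PySem.Str.strip (ps.getD 1 "")) = ts
    generalize PySem.Str.strIsalpha (PySem.Str.strip (ps.getD 0 "")) = a
    generalize (everyOther ts).all PySem.Str.strIsalpha = e
    generalize (everyOther ts.tail).all (fun t => allowedRelations.contains t) = o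
    generalize allowedRelations.contains (PySem.List.pyGetD ts (-1) "") = c
    generalize parseSigLineLoop rest = r
    split_ifs <;> cases a <;> cases e <;> cases o <;> cases c <;> simp_all

-- ===== VERDICT (by name: the statement is the Claim_ definition above) =====
theorem parse_sig_spec : Claim_equal_parse_sig := by
  intro sig _
  unfold Spec_parse_sig parse_sig parse_sig_alt
  exact lineLoop_eq_all _
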